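-- pv_equiv track=rewrite | github.com/santanuhalder/santanuhalder | practice_programs/name_chain.py | longest_name_chain
-- ===== SOURCE A (Python) =====
-- def longest_name_chain(names):
--     max_length = 0
--     for key, value in names.items():
--         name_chain = []
--         name_chain.append(key + " " + value)
--         names_ = {k: v for k, v in names.items() if k != key}
--         counter = len(names_)
--         while len(names_) >=1 and counter >=1:
--             last_name = name_chain[len(name_chain) - 1].split(" ")[1]
--             if last_name in names_:
--                 name_chain.append(last_name + " " + names_[last_name])
--                 names_ = {k: v for k, v in names_.items() if k != last_name}
--             counter -= 1
--         max_length = max(max_length, len(name_chain))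
--     return max_length
-- ===== SOURCE B (Python) =====
-- def longest_name_chain(names):
--     best = 0
--     for start in names:
--         seen = set()
--         cur = start
--         length = 0
--         while cur in names and cur not in seen:
--             seen.add(cur)
--             length += 1
--             cur = (cur + " " + names[cur]).split(" ")[1]
--         best = max(best, length)
--     return best
-- ===== Notes on version B (the rewrite author's own statement) =====
-- stated objective: faster
-- what changed: Instead of rebuilding the remaining dict from scratch at every loop iteration and spinning a countdown counter, B follows each start key's chain once over the original dict with a visited set, so the inner dict reconstructions and the dead counter iterations disappear.
import Mathlib
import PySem

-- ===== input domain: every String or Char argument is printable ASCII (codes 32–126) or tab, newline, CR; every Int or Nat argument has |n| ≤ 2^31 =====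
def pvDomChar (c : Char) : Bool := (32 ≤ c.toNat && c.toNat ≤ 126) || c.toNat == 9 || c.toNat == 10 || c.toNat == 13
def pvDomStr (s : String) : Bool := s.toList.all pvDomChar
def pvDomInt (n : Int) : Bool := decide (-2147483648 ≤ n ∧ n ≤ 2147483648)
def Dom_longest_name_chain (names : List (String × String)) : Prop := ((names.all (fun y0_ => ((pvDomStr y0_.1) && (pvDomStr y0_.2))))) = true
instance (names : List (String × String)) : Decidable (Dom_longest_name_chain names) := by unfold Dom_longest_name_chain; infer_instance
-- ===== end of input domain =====

-- B replaces A's per-step dict rebuilds and countdown counter by a single walk over the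
-- original dict with a visited set; return value only (neither side mutates its argument).

-- ===== PORT A =====
-- (x).split(" ")[1]; every string both programs split contains the " " just appended,
-- so split? is `some` and the [1] IndexError branch (the getD "") is unreachable.
def pvTok1 (s : String) : String :=
  (PySem.List.pyGet? ((PySem.Str.split? s " ").getD []) 1).getD ""

-- A's inner while loop: the counter is the structural fuel (it is decremented every
-- iteration); rem is names_, chain is name_chain (chain[len-1] is getLastD, chain nonempty)
def pvLoopA : Nat → List String → List (String × String) → List String
  | 0, chain, _ => chain
  | Nat.succ c, chain, rem =>
    if 1 ≤ rem.length then
      match rem.find? (fun p => p.1 == pvTok1 (chain.getLastD "")) with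
      | some p => pvLoopA c (chain ++ [pvTok1 (chain.getLastD "") ++ " " ++ p.2])
          (rem.filter (fun q => q.1 != pvTok1 (chain.getLastD "")))
      | none => pvLoopA c chain rem
    else chain

def longest_name_chain (names : List (String × String)) : Int :=
  names.foldl (fun max_length kv =>
    let name_chain : List String := [kv.1 ++ " " ++ kv.2]
    let names_ := names.filter (fun p => p.1 != kv.1)
    max max_length ((pvLoopA names_.length name_chain names_).length : Int)) 0

-- ===== PORT B =====
-- Source B's while loop: seen is a Python set; the fuel names.length + 1 bounds the
-- iteration count (each true guard adds a fresh key of names to seen)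
def pvLoopB : Nat → List (String × String) → PySem.Set String → String → Nat → Nat
  | 0, _, _, _, len => len
  | Nat.succ f, names, seen, cur, len =>
    if names.any (fun p => p.1 == cur) && !(PySem.Set.contains seen cur) then
      pvLoopB f names (PySem.Set.add seen cur)
        (pvTok1 (cur ++ " " ++ ((names.find? (fun p => p.1 == cur)).map Prod.snd).getD ""))
        (len + 1)
    else len

def longest_name_chain_alt (names : List (String × String)) : Int :=
  names.foldl (fun best kv =>
    max best ((pvLoopB (names.length + 1) names PySem.Set.empty kv.1 0 : Nat) : Int)) 0

-- ===== PRECONDITION & SPEC =====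
-- The argument is a Python dict: association lists with duplicate keys represent no dict
-- (A, taking a dict, can never receive one), so Pre_ only requires the keys to be distinct.
def Pre_longest_name_chain (names : List (String × String)) : Prop :=
  (names.map Prod.fst).Nodup
instance (names : List (String × String)) : Decidable (Pre_longest_name_chain names) := by
  unfold Pre_longest_name_chain; infer_instance

def pvWitness_longest_name_chain : (List (String × String)) :=
  [("alice", "bob"), ("bob", "carol"), ("carol", "dan")]

def Spec_longest_name_chain (names : List (String × String)) (out : Int) : Prop := out = longest_name_chain_alt names
instance (names : List (String × String)) (out : Int) : Decidable (Spec_longest_name_chain names out) := by unfold Spec_longest_name_chain; infer_instance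

-- ===== CLAIM (what is proved, stated in full; the proofs are below) =====
def Claim_equal_longest_name_chain : Prop := ∀ (names : List (String × String)), Dom_longest_name_chain names → Pre_longest_name_chain names → Spec_longest_name_chain names (longest_name_chain names)

-- ===== LEMMAS AND PROOFS =====

-- number of greedy chain steps from cur over the remaining entries R (fuel ≥ R.length)
def pvSteps : Nat → List (String × String) → String → Nat
  | 0, _, _ => 0
  | Nat.succ f, R, cur =>
    match R.find? (fun p => p.1 == cur) with
    | none => 0
    | some p => 1 + pvSteps f (R.filter (fun q => q.1 != cur)) (pvTok1 (cur ++ " " ++ p.2))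

theorem pvFilter_lt {R : List (String × String)} {cur : String} {p : String × String}
    (h : R.find? (fun p => p.1 == cur) = some p) :
    (R.filter (fun q => q.1 != cur)).length < R.length := by
  have hmem := List.mem_of_find?_eq_some h
  have hp := List.find?_some h
  exact List.length_filter_lt_length_iff_exists.mpr ⟨p, hmem, by simp_all⟩

theorem pvSteps_fuel : ∀ (f g : Nat) (R : List (String × String)) (cur : String),
    R.length ≤ f → R.length ≤ g → pvSteps f R cur = pvSteps g R cur := by
  intro f
  induction f with
  | zero =>
    intro g R cur hf _
    have : R = [] := by cases R <;> simp_all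
    subst this
    cases g <;> simp [pvSteps]
  | succ f ih =>
    intro g R cur hf hg
    cases g with
    | zero =>
      have : R = [] := by cases R <;> simp_all
      subst this
      simp [pvSteps]
    | succ g =>
      simp only [pvSteps]
      cases hfind : R.find? (fun p => p.1 == cur) with
      | none => rfl
      | some p =>
        have hlt := pvFilter_lt hfind
        show 1 + pvSteps f (R.filter (fun q => q.1 != cur)) (pvTok1 (cur ++ " " ++ p.2))
           = 1 + pvSteps g (R.filter (fun q => q.1 != cur)) (pvTok1 (cur ++ " " ++ p.2))
        rw [ih g (R.filter (fun q => q.1 != cur)) _ (by omega) (by omega)]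

theorem pvSteps_le : ∀ (f : Nat) (R : List (String × String)) (cur : String),
    pvSteps f R cur ≤ R.length := by
  intro f
  induction f with
  | zero => intro R cur; simp [pvSteps]
  | succ f ih =>
    intro R cur
    simp only [pvSteps]
    cases hfind : R.find? (fun p => p.1 == cur) with
    | none => simp
    | some p =>
      have hlt := pvFilter_lt hfind
      have hle := ih (R.filter (fun q => q.1 != cur)) (pvTok1 (cur ++ " " ++ p.2))
      show 1 + pvSteps f (R.filter (fun q => q.1 != cur)) (pvTok1 (cur ++ " " ++ p.2)) ≤ R.length
      omega

theorem pvSteps_none {R : List (String × String)} {cur : String}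
    (h : R.find? (fun p => p.1 == cur) = none) (f : Nat) : pvSteps f R cur = 0 := by
  cases f with
  | zero => rfl
  | succ f => simp only [pvSteps]; rw [h]

theorem pvSteps_some {R : List (String × String)} {cur : String} {p : String × String} {f : Nat}
    (h : R.find? (fun p => p.1 == cur) = some p) (hf : R.length ≤ f) :
    pvSteps f R cur
      = 1 + pvSteps (R.filter (fun q => q.1 != cur)).length (R.filter (fun q => q.1 != cur))
          (pvTok1 (cur ++ " " ++ p.2)) := by
  have hne : R ≠ [] := by
    intro he; subst he; simp at h
  cases f with
  | zero =>
    exfalso; cases R with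
    | nil => exact hne rfl
    | cons a as => simp at hf
  | succ f =>
    simp only [pvSteps]; rw [h]
    have hlt := pvFilter_lt h
    show 1 + pvSteps f (R.filter (fun q => q.1 != cur)) (pvTok1 (cur ++ " " ++ p.2)) = _
    rw [pvSteps_fuel f (R.filter (fun q => q.1 != cur)).length _ _ (by omega) le_rfl]

-- A's inner loop appends exactly pvSteps-many elements, provided the counter suffices
theorem pvLoopA_len : ∀ (c : Nat) (rem : List (String × String)) (chain : List String),
    pvSteps rem.length rem (pvTok1 (chain.getLastD "")) ≤ c →
    (pvLoopA c chain rem).length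
      = chain.length + pvSteps rem.length rem (pvTok1 (chain.getLastD "")) := by
  intro c
  induction c with
  | zero => intro rem chain hle; simp only [pvLoopA]; omega
  | succ c ih =>
    intro rem chain hle
    rw [pvLoopA]
    by_cases hrem : 1 ≤ rem.length
    · rw [if_pos hrem]
      cases hfind : rem.find? (fun p => p.1 == pvTok1 (chain.getLastD "")) with
      | none =>
        rw [pvSteps_none hfind] at hle ⊢
        show (pvLoopA c chain rem).length = chain.length + 0
        rw [ih rem chain (by rw [pvSteps_none hfind]; omega), pvSteps_none hfind]
      | some p =>
        have hlt := pvFilter_lt hfind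
        rw [pvSteps_some hfind le_rfl] at hle ⊢
        show (pvLoopA c (chain ++ [pvTok1 (chain.getLastD "") ++ " " ++ p.2]) _).length = _
        rw [ih _ (chain ++ [pvTok1 (chain.getLastD "") ++ " " ++ p.2]) ?hb]
        case hb =>
          rw [List.getLastD_concat]
          omega
        rw [List.getLastD_concat]
        simp only [List.length_append, List.length_cons, List.length_nil]
        omega
    · have : rem = [] := by cases rem <;> simp_all
      subst this
      rw [if_neg hrem]
      simp [pvSteps]

-- a filter that keeps everything the find? predicate accepts does not change the first match
theorem pvFind_filter (l : List (String × String)) (p q : (String × String) → Bool)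
    (h : ∀ x, q x = true → p x = true) : (l.filter p).find? q = l.find? q := by
  induction l with
  | nil => rfl
  | cons a as ih =>
    by_cases hq : q a = true
    · rw [List.filter_cons, if_pos (h a hq), List.find?_cons, hq, List.find?_cons, hq]
    · have hq' : q a = false := by simpa using hq
      by_cases hp : p a = true
      · rw [List.filter_cons, if_pos hp, List.find?_cons, hq', List.find?_cons, hq', ih]
      · rw [List.filter_cons, if_neg hp, List.find?_cons, hq', ih]

-- with cur unvisited, filtering out the visited keys does not change the first match
theorem pvFind_filter_unseen (names : List (String × String)) (seen : PySem.Set String)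
    (cur : String) (hc : PySem.Set.contains seen cur = false) :
    (names.filter (fun p => !(PySem.Set.contains seen p.1))).find? (fun p => p.1 == cur)
      = names.find? (fun p => p.1 == cur) := by
  apply pvFind_filter
  intro x hx
  have : x.1 = cur := by simpa using hx
  rw [this, hc]
  rfl

-- with cur already visited, the filtered remainder holds no entry keyed cur
theorem pvFind_filter_seen (names : List (String × String)) (seen : PySem.Set String)
    (cur : String) (hc : PySem.Set.contains seen cur = true) :
    (names.filter (fun p => !(PySem.Set.contains seen p.1))).find? (fun p => p.1 == cur)
      = none := by
  rw [List.find?_eq_none]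
  intro p hp
  have hmem := List.mem_filter.mp hp
  intro hpc
  have : p.1 = cur := by simpa using hpc
  subst this
  simp_all

-- growing the visited set by cur = filtering the remainder by key ≠ cur
theorem pvFilter_add (names : List (String × String)) (seen : PySem.Set String) (cur : String) :
    names.filter (fun p => !(PySem.Set.contains (PySem.Set.add seen cur) p.1))
      = (names.filter (fun p => !(PySem.Set.contains seen p.1))).filter
          (fun q => q.1 != cur) := by
  rw [List.filter_filter]
  apply List.filter_congr
  intro p _
  have hmem : p.1 ∈ PySem.Set.add seen cur ↔ p.1 ∈ seen ∨ p.1 = cur := PySem.Set.mem_add seen cur p.1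
  by_cases h1 : p.1 ∈ seen
  · have hs : PySem.Set.contains seen p.1 = true := (PySem.Set.contains_iff _ _).mpr h1
    have ha : PySem.Set.contains (PySem.Set.add seen cur) p.1 = true :=
      (PySem.Set.contains_iff _ _).mpr (hmem.mpr (Or.inl h1))
    rw [hs, ha]
    simp
  · have hs : PySem.Set.contains seen p.1 = false := by
      cases hv : PySem.Set.contains seen p.1
      · rfl
      · exact absurd ((PySem.Set.contains_iff _ _).mp hv) h1
    by_cases h2 : p.1 = cur
    · have ha : PySem.Set.contains (PySem.Set.add seen cur) p.1 = true :=
        (PySem.Set.contains_iff _ _).mpr (hmem.mpr (Or.inr h2))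
      rw [hs, ha]
      simp [h2]
    · have ha : PySem.Set.contains (PySem.Set.add seen cur) p.1 = false := by
        cases hv : PySem.Set.contains (PySem.Set.add seen cur) p.1
        · rfl
        · rcases hmem.mp ((PySem.Set.contains_iff _ _).mp hv) with h | h
          · exact absurd h h1
          · exact absurd h h2
      rw [hs, ha]
      simp [h2]

-- Source B's while loop counts exactly the pvSteps of the unvisited remainder
theorem pvLoopB_len : ∀ (f : Nat) (names : List (String × String)) (seen : PySem.Set String)
    (cur : String) (len : Nat),
    pvSteps (names.filter (fun p => !(PySem.Set.contains seen p.1))).length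
      (names.filter (fun p => !(PySem.Set.contains seen p.1))) cur ≤ f →
    pvLoopB f names seen cur len
      = len + pvSteps (names.filter (fun p => !(PySem.Set.contains seen p.1))).length
          (names.filter (fun p => !(PySem.Set.contains seen p.1))) cur := by
  intro f
  induction f with
  | zero => intro names seen cur len hle; simp only [pvLoopB]; omega
  | succ f ih =>
    intro names seen cur len hle
    rw [pvLoopB]
    by_cases hg : (names.any (fun p => p.1 == cur) && !(PySem.Set.contains seen cur)) = true
    · rw [if_pos hg]
      rw [Bool.and_eq_true] at hg
      have hany : names.any (fun p => p.1 == cur) = true := hg.1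
      have hunseen : PySem.Set.contains seen cur = false := by
        have := hg.2; simpa using this
      obtain ⟨p, hfind⟩ : ∃ p, names.find? (fun p => p.1 == cur) = some p := by
        have hs : (names.find? (fun p => p.1 == cur)).isSome := by
          rw [List.find?_isSome]
          exact List.any_eq_true.mp hany
        exact Option.isSome_iff_exists.mp hs
      have hRfind := pvFind_filter_unseen names seen cur hunseen
      rw [hfind] at hRfind
      have hv : ((names.find? (fun p => p.1 == cur)).map Prod.snd).getD "" = p.2 := by
        rw [hfind]; rfl
      rw [hv]
      rw [pvSteps_some hRfind le_rfl] at hle ⊢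
      rw [ih names (PySem.Set.add seen cur) _ (len + 1) ?hb]
      case hb =>
        rw [pvFilter_add]; omega
      rw [pvFilter_add]
      omega
    · rw [if_neg hg]
      have h0 : (names.filter (fun p => !(PySem.Set.contains seen p.1))).find?
          (fun p => p.1 == cur) = none := by
        cases hca : names.any (fun p => p.1 == cur) with
        | false =>
          rw [List.find?_eq_none]
          intro p hp hpc
          have hm := (List.mem_filter.mp hp).1
          have : names.any (fun p => p.1 == cur) = true :=
            List.any_eq_true.mpr ⟨p, hm, hpc⟩
          simp_all
        | true =>
          have hcc : PySem.Set.contains seen cur = true := by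
            cases hcc2 : PySem.Set.contains seen cur
            · exact absurd (by rw [hca, hcc2]; rfl) hg
            · rfl
          exact pvFind_filter_seen names seen cur hcc
      rw [pvSteps_none h0]
      omega

-- with distinct keys, the first entry keyed kv.1 is kv itself
theorem pvFind_self : ∀ (names : List (String × String)) (kv : String × String),
    (names.map Prod.fst).Nodup → kv ∈ names →
    names.find? (fun p => p.1 == kv.1) = some kv := by
  intro names
  induction names with
  | nil => intro kv _ hmem; simp at hmem
  | cons a as ih =>
    intro kv hnd hmem
    rcases List.mem_cons.mp hmem with h | h
    · subst h
      simp
    · rw [List.map_cons, List.nodup_cons] at hnd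
      obtain ⟨ha, hnd'⟩ := hnd
      have hne : (a.1 == kv.1) = false := by
        have : kv.1 ∈ as.map Prod.fst := List.mem_map.mpr ⟨kv, h, rfl⟩
        simp only [beq_eq_false_iff_ne, ne_eq]
        intro he; exact ha (he ▸ this)
      rw [List.find?_cons, hne]
      exact ih kv hnd' h

-- the empty visited set filters nothing away
theorem pvFilter_empty (names : List (String × String)) :
    names.filter (fun p => !(PySem.Set.contains PySem.Set.empty p.1)) = names := by
  induction names with
  | nil => rfl
  | cons a as ih => simp [PySem.Set.empty, PySem.Set.contains]

-- ===== VERDICT (by name: the statement is the Claim_ definition above) =====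
theorem longest_name_chain_spec : Claim_equal_longest_name_chain := by
  intro names _ hpre
  unfold Spec_longest_name_chain longest_name_chain longest_name_chain_alt
  apply PySem.List.foldl_congr_mem
  intro acc kv hmem
  have hA : (pvLoopA (names.filter (fun p => p.1 != kv.1)).length [kv.1 ++ " " ++ kv.2]
      (names.filter (fun p => p.1 != kv.1))).length
      = 1 + pvSteps (names.filter (fun p => p.1 != kv.1)).length
          (names.filter (fun p => p.1 != kv.1)) (pvTok1 (kv.1 ++ " " ++ kv.2)) := by
    rw [pvLoopA_len _ _ [kv.1 ++ " " ++ kv.2] (by simpa using pvSteps_le _ _ _)]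
    simp
  have hfind := pvFind_self names kv hpre hmem
  have hB : pvLoopB (names.length + 1) names PySem.Set.empty kv.1 0
      = 1 + pvSteps (names.filter (fun p => p.1 != kv.1)).length
          (names.filter (fun p => p.1 != kv.1)) (pvTok1 (kv.1 ++ " " ++ kv.2)) := by
    rw [pvLoopB_len (names.length + 1) names PySem.Set.empty kv.1 0 ?hb]
    case hb =>
      rw [pvFilter_empty]
      exact le_trans (pvSteps_le _ _ _) (by omega)
    rw [pvFilter_empty, pvSteps_some hfind le_rfl]
    omega
  simp only [hA, hB]
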